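-- pv_equiv track=rewrite | github.com/pypi-data/pypi-mirror-97 | packages/napoleontoolbox/napoleontoolbox-2.88.tar.gz/napoleontoolbox-2.88/napoleontoolbox/signal/parameters_generator.py | generate_lead_lag
-- ===== SOURCE A (Python) =====
-- def generate_lead_lag(lookback_windows, lead_lags, contravariants, ):
--     parameters = []
--     for contravariant in contravariants:
--         for lookback_window in lookback_windows:
--             for lead in lead_lags:
--                 if lead < lookback_window:
--                     parameters.append({
--                         'lead':lead,
--                         'lookback_window':lookback_window,
--                         'contravariant':contravariant
--                     })
--     return parameters
-- ===== SOURCE B (Python) =====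
-- def generate_lead_lag(lookback_windows, lead_lags, contravariants, ):
--     # Precompute once, per lookback_window, the leads that qualify (lead < lookback_window),
--     # then reuse that table for every contravariant.
--     table = [(lookback_window, [lead for lead in lead_lags if lead < lookback_window])
--              for lookback_window in lookback_windows]
--     return [
--         {'lead': lead, 'lookback_window': lookback_window, 'contravariant': contravariant}
--         for contravariant in contravariants
--         for (lookback_window, leads) in table
--         for lead in leads
--     ]
-- ===== Notes on version B (the rewrite author's own statement) =====
-- stated objective: alternative
-- what changed: B precomputes the qualifying leads per lookback_window once and reuses that table across all contravariants via a flat comprehension, instead of re-filtering lead_lags inside the contravariant loop with repeated appends.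
import Mathlib
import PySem

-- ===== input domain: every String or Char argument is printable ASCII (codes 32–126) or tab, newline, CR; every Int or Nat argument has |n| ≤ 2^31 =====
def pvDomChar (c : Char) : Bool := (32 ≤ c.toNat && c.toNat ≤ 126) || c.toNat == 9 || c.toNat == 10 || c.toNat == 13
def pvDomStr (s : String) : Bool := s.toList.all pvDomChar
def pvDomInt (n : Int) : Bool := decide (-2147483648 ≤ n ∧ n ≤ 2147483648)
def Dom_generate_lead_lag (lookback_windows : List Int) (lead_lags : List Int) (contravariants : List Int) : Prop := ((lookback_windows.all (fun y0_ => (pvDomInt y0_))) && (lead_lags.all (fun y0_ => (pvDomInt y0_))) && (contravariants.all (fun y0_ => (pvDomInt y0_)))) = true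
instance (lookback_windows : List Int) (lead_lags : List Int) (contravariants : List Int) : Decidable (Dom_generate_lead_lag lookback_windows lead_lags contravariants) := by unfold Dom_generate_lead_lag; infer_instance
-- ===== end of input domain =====

-- B precomputes the qualifying leads per lookback_window once and reuses that table
-- across all contravariants via a flat comprehension (objective: alternative decomposition).

-- ===== PORT A =====
-- three nested for-loops appending filtered dicts to an accumulator
def generate_lead_lag (lookback_windows : List Int) (lead_lags : List Int) (contravariants : List Int) : List (List (String × Int)) :=
  contravariants.foldl (fun parameters contravariant =>
    lookback_windows.foldl (fun parameters lookback_window =>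
      lead_lags.foldl (fun parameters lead =>
        if lead < lookback_window then
          parameters ++ [[("lead", lead), ("lookback_window", lookback_window), ("contravariant", contravariant)]]
        else parameters) parameters) parameters) []

-- ===== PORT B =====
-- a table (lookback_window, qualifying leads) built once, then a flat comprehension
def generate_lead_lag_alt (lookback_windows : List Int) (lead_lags : List Int) (contravariants : List Int) : List (List (String × Int)) :=
  let table : List (Int × List Int) :=
    lookback_windows.map (fun lookback_window => (lookback_window, lead_lags.filter (fun lead => lead < lookback_window)))
  contravariants.flatMap (fun contravariant =>
    table.flatMap (fun p =>
      p.2.map (fun lead => [("lead", lead), ("lookback_window", p.1), ("contravariant", contravariant)])))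

-- ===== PRECONDITION & SPEC =====
def Spec_generate_lead_lag (lookback_windows : List Int) (lead_lags : List Int) (contravariants : List Int) (out : List (List (String × Int))) : Prop := out = generate_lead_lag_alt lookback_windows lead_lags contravariants
instance (lookback_windows : List Int) (lead_lags : List Int) (contravariants : List Int) (out : List (List (String × Int))) : Decidable (Spec_generate_lead_lag lookback_windows lead_lags contravariants out) := by unfold Spec_generate_lead_lag; infer_instance

-- ===== CLAIM (what is proved, stated in full; the proofs are below) =====
def Claim_equal_generate_lead_lag : Prop := ∀ (lookback_windows : List Int) (lead_lags : List Int) (contravariants : List Int), Dom_generate_lead_lag lookback_windows lead_lags contravariants → Spec_generate_lead_lag lookback_windows lead_lags contravariants (generate_lead_lag lookback_windows lead_lags contravariants)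

-- ===== LEMMAS AND PROOFS =====

-- inner loop: appending under a filter condition is acc ++ map-over-filter
theorem pv_inner (lw c : Int) (lls : List Int) (acc : List (List (String × Int))) :
    lls.foldl (fun parameters lead =>
        if lead < lw then
          parameters ++ [[("lead", lead), ("lookback_window", lw), ("contravariant", c)]]
        else parameters) acc
    = acc ++ (lls.filter (fun lead => lead < lw)).map
        (fun lead => [("lead", lead), ("lookback_window", lw), ("contravariant", c)]) := by
  induction lls generalizing acc with
  | nil => simp
  | cons x xs ih =>
    simp only [List.foldl_cons, List.filter_cons]
    by_cases h : x < lw <;> simp [h, ih, List.append_assoc]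

-- middle loop: folding the inner result over lookback_windows is acc ++ a flatMap over the table
theorem pv_middle (c : Int) (lbs lls : List Int) (acc : List (List (String × Int))) :
    lbs.foldl (fun parameters lw =>
        lls.foldl (fun parameters lead =>
          if lead < lw then
            parameters ++ [[("lead", lead), ("lookback_window", lw), ("contravariant", c)]]
          else parameters) parameters) acc
    = acc ++ (lbs.map (fun lw => (lw, lls.filter (fun lead => lead < lw)))).flatMap
        (fun p => p.2.map (fun lead => [("lead", lead), ("lookback_window", p.1), ("contravariant", c)])) := by
  induction lbs generalizing acc with
  | nil => simp
  | cons x xs ih =>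
    simp only [List.foldl_cons, List.map_cons, List.flatMap_cons]
    rw [pv_inner, ih, List.append_assoc]

-- outer loop
theorem pv_outer (lbs lls cvs : List Int) (acc : List (List (String × Int))) :
    cvs.foldl (fun parameters c =>
        lbs.foldl (fun parameters lw =>
          lls.foldl (fun parameters lead =>
            if lead < lw then
              parameters ++ [[("lead", lead), ("lookback_window", lw), ("contravariant", c)]]
            else parameters) parameters) parameters) acc
    = acc ++ cvs.flatMap (fun c =>
        (lbs.map (fun lw => (lw, lls.filter (fun lead => lead < lw)))).flatMap
          (fun p => p.2.map (fun lead => [("lead", lead), ("lookback_window", p.1), ("contravariant", c)]))) := by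
  induction cvs generalizing acc with
  | nil => simp
  | cons x xs ih =>
    simp only [List.foldl_cons, List.flatMap_cons]
    rw [pv_middle, ih, List.append_assoc]

-- ===== VERDICT (by name: the statement is the Claim_ definition above) =====
theorem generate_lead_lag_spec : Claim_equal_generate_lead_lag := by
  intro lbs lls cvs _
  unfold Spec_generate_lead_lag generate_lead_lag generate_lead_lag_alt
  rw [pv_outer]
  simp
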